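-- pv_equiv track=rewrite | github.com/vermutsk/Laborator | NE_metodi/lab17.py | all_num_in_fi
-- ===== SOURCE A (Python) =====
-- def all_num_in_fi(num: int) -> list:
--     simple_list = []
--     for i in range(2, num):
--         if num % i != 0:
--             simple_list.append(i)
--         else:
--             continue
--     return simple_list
-- ===== SOURCE B (Python) =====
-- def all_num_in_fi(num: int) -> list:
--     # Enumerate the divisors of num with a sqrt(num) trial-division loop,
--     # then take the complement of that divisor table over [2, num).
--     divs = set()
--     j = 2
--     while j * j <= num:
--         if num % j == 0:
--             divs.add(j)
--             divs.add(num // j)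
--         j += 1
--     return [i for i in range(2, num) if i not in divs]
-- ===== Notes on version B (the rewrite author's own statement) =====
-- stated objective: alternative
-- what changed: B precomputes the divisor set of num with a sqrt(num) trial-division loop and then emits the complement over range(2,num), instead of testing num % i for every candidate i.
import Mathlib
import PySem

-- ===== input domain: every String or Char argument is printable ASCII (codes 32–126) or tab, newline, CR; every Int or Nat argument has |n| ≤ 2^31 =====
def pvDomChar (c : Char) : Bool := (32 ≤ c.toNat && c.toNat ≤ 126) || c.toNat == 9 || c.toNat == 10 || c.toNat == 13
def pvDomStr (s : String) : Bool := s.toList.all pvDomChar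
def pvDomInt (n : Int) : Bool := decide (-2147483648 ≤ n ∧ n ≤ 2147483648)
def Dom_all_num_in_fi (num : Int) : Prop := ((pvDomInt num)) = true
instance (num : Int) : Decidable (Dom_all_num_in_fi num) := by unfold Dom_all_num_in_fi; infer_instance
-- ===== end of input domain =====

-- B replaces A's per-candidate divisibility test by a sqrt(num) trial-division pass that
-- tabulates the divisor set of num, then emits the complement over [2, num) (alternative algorithm).

-- ===== PORT A =====
-- for i in range(2, num): if num % i != 0: simple_list.append(i)
def all_num_in_fi (num : Int) : List Int :=
  (PySem.List.pyRange 2 num 1).foldl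
    (fun acc i => if PySem.Int.mod num i != 0 then acc ++ [i] else acc) []

-- ===== PORT B =====
-- while j * j <= num: if num % j == 0: divs.add(j); divs.add(num // j); j += 1
def altDivLoop (num j : Int) (divs : PySem.Set Int) : PySem.Set Int :=
  if j * j ≤ num then
    altDivLoop num (j + 1)
      (if PySem.Int.mod num j == 0 then
        PySem.Set.add (PySem.Set.add divs j) (PySem.Int.floordiv num j)
      else divs)
  else divs
termination_by (num + 2 - j).toNat
decreasing_by
  have h0 : (0 : Int) ≤ j * j := mul_self_nonneg j
  by_cases hj : j ≤ 0
  · omega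
  · have : j ≤ j * j := le_mul_of_one_le_left (by omega) (by omega)
    omega

-- [i for i in range(2, num) if i not in divs]
def all_num_in_fi_alt (num : Int) : List Int :=
  let divs := altDivLoop num 2 PySem.Set.empty
  (PySem.List.pyRange 2 num 1).foldl
    (fun acc i => if !(PySem.Set.contains divs i) then acc ++ [i] else acc) []

-- ===== PRECONDITION & SPEC =====
def Spec_all_num_in_fi (num : Int) (out : List Int) : Prop := out = all_num_in_fi_alt num
instance (num : Int) (out : List Int) : Decidable (Spec_all_num_in_fi num out) := by unfold Spec_all_num_in_fi; infer_instance

-- ===== CLAIM (what is proved, stated in full; the proofs are below) =====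
def Claim_equal_all_num_in_fi : Prop := ∀ (num : Int), Dom_all_num_in_fi num → Spec_all_num_in_fi num (all_num_in_fi num)

-- ===== LEMMAS AND PROOFS =====

-- Membership in the divisor table built by B's while-loop.
theorem mem_altDivLoop (num j : Int) (divs : PySem.Set Int) (d : Int) : 2 ≤ j →
    (d ∈ altDivLoop num j divs ↔
      d ∈ divs ∨ ∃ k, j ≤ k ∧ k * k ≤ num ∧ num % k = 0 ∧ (d = k ∨ d = num / k)) := by
  fun_induction altDivLoop num j divs with
  | case1 j divs hle ih =>
    intro hj
    simp only [dite_eq_ite] at ih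
    rw [ih (by omega)]
    have hmod : PySem.Int.mod num j = num % j := PySem.Int.mod_eq_emod_of_pos (by omega)
    have hdiv : PySem.Int.floordiv num j = num / j := PySem.Int.floordiv_eq_ediv_of_pos (by omega)
    constructor
    · rintro (hd | ⟨k, hk1, hk2, hk3, hk4⟩)
      · by_cases hz : num % j = 0
        · simp only [hmod, hz, BEq.rfl, if_pos] at hd
          rcases (PySem.Set.mem_add _ _ _).mp hd with hd' | hd'
          · rcases (PySem.Set.mem_add _ _ _).mp hd' with hd'' | hd''
            · exact Or.inl hd''
            · exact Or.inr ⟨j, le_refl _, hle, hz, Or.inl hd''⟩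
          · exact Or.inr ⟨j, le_refl _, hle, hz, Or.inr (by rw [hd', hdiv])⟩
        · simp only [hmod, beq_iff_eq, if_neg hz] at hd
          exact Or.inl hd
      · exact Or.inr ⟨k, by omega, hk2, hk3, hk4⟩
    · rintro (hd | ⟨k, hk1, hk2, hk3, hk4⟩)
      · left
        by_cases hz : num % j = 0
        · simp only [hmod, hz, BEq.rfl, if_pos]
          exact (PySem.Set.mem_add _ _ _).mpr (Or.inl ((PySem.Set.mem_add _ _ _).mpr (Or.inl hd)))
        · simp only [hmod, beq_iff_eq, if_neg hz]
          exact hd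
      · rcases eq_or_lt_of_le hk1 with heq | hlt
        · subst heq
          left
          simp only [hmod, hk3, BEq.rfl, if_pos]
          rcases hk4 with h | h
          · exact (PySem.Set.mem_add _ _ _).mpr (Or.inl ((PySem.Set.mem_add _ _ _).mpr (Or.inr h)))
          · exact (PySem.Set.mem_add _ _ _).mpr (Or.inr (by rw [h, hdiv]))
        · exact Or.inr ⟨k, by omega, hk2, hk3, hk4⟩
  | case2 j divs hle =>
    intro hj
    constructor
    · exact Or.inl
    · rintro (hd | ⟨k, hk1, hk2, hk3, _⟩)
      · exact hd
      · exfalso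
        have : j ≤ k * k := le_trans hk1 (le_mul_of_one_le_left (by omega) (by omega))
        -- k*k monotone: j ≤ k and 2 ≤ j ≤ k give j*j ≤ k*k ≤ num, contradicting hle
        have hjk : j * j ≤ k * k := mul_le_mul hk1 hk1 (by omega) (by omega)
        omega

-- A number 2 ≤ i < num divides num iff it or its cofactor shows up below sqrt(num).
theorem divisor_table_complete (num i : Int) (h2 : 2 ≤ i) (hin : i < num) :
    ((∃ k, 2 ≤ k ∧ k * k ≤ num ∧ num % k = 0 ∧ (i = k ∨ i = num / k)) ↔ num % i = 0) := by
  have hnum : 3 ≤ num := by omega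
  constructor
  · rintro ⟨k, hk2, hkk, hkm, hik⟩
    have hkdvd : k ∣ num := Int.dvd_of_emod_eq_zero hkm
    rcases hik with h | h
    · rw [h]; exact Int.emod_emod_of_dvd num (dvd_refl _) ▸ hkm
    · subst h
      have : num / k ∣ num := by
        obtain ⟨c, hc⟩ := hkdvd
        refine ⟨k, ?_⟩
        rw [hc, Int.mul_ediv_cancel_left _ (by omega), mul_comm]
      exact Int.emod_eq_zero_of_dvd this
  · intro him
    have hidvd : i ∣ num := Int.dvd_of_emod_eq_zero him
    by_cases hii : i * i ≤ num
    · exact ⟨i, h2, hii, him, Or.inl rfl⟩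
    · rw [not_le] at hii
      set k := num / i with hk
      obtain ⟨c, hc⟩ := hidvd
      have hck : c = k := by
        rw [hk, hc, Int.mul_ediv_cancel_left _ (by omega)]
      have hcpos : 1 ≤ c := by nlinarith
      have hcne : c ≠ 1 := by
        intro h; rw [h, mul_one] at hc; omega
      have hk2 : 2 ≤ k := by omega
      have hki : k < i := by nlinarith
      refine ⟨k, hk2, ?_, ?_, Or.inr ?_⟩
      · nlinarith
      · exact Int.emod_eq_zero_of_dvd ⟨i, by rw [hc, ← hck]; ring⟩
      · rw [hc, ← hck, Int.mul_ediv_cancel _ (by omega)]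

theorem mem_divs_iff (num i : Int) (h2 : 2 ≤ i) (hin : i < num) :
    (i ∈ altDivLoop num 2 PySem.Set.empty ↔ num % i = 0) := by
  rw [mem_altDivLoop num 2 PySem.Set.empty i (le_refl 2)]
  rw [← divisor_table_complete num i h2 hin]
  simp [PySem.Set.empty]

-- ===== VERDICT (by name: the statement is the Claim_ definition above) =====
theorem all_num_in_fi_spec : Claim_equal_all_num_in_fi := by
  intro num _
  unfold Spec_all_num_in_fi all_num_in_fi all_num_in_fi_alt
  rw [PySem.List.foldl_append_if_eq_filter, PySem.List.foldl_append_if_eq_filter]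
  simp only [List.nil_append]
  apply List.filter_congr
  intro i hi
  obtain ⟨h2, hin⟩ := (PySem.List.mem_pyRange_one).mp hi
  have hmod : PySem.Int.mod num i = num % i := PySem.Int.mod_eq_emod_of_pos (by omega)
  have hiff : i ∈ altDivLoop num 2 ([] : List Int) ↔ num % i = 0 := mem_divs_iff num i h2 hin
  by_cases hz : num % i = 0
  · simp [hmod, hz, hiff]
  · simp [hmod, hz, hiff]
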